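-- pv_equiv track=rewrite | github.com/Matthew-94/Facility-Design | layoutwise_app.py | best_rel_rank_to_placed
-- ===== SOURCE A (Python) =====
-- def best_rel_rank_to_placed(dept, placed, rel_matrix):
--     rank = {'A': 5, 'E': 4, 'I': 3, 'O': 2, 'U': 1, 'X': 0}
--     best_rank = -1
--     best_letter = None
--     for p in placed:
--         rel = rel_matrix[(dept, p)]
--         if rank[rel] > best_rank:
--             best_rank = rank[rel]
--             best_letter = rel
--     return best_rank, best_letter
-- ===== SOURCE B (Python) =====
-- def best_rel_rank_to_placed(dept, placed, rel_matrix):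
--     present = {rel_matrix[(dept, p)] for p in placed}
--     for letter, rk in (('A', 5), ('E', 4), ('I', 3), ('O', 2), ('U', 1), ('X', 0)):
--         if letter in present:
--             return rk, letter
--     return -1, None
-- ===== Notes on version B (the rewrite author's own statement) =====
-- stated objective: alternative
-- what changed: B builds the set of relationship letters present among placed, then scans the fixed six-letter priority table from best to worst and returns the first letter found, instead of tracking a running maximum rank over placed.
import Mathlib
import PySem

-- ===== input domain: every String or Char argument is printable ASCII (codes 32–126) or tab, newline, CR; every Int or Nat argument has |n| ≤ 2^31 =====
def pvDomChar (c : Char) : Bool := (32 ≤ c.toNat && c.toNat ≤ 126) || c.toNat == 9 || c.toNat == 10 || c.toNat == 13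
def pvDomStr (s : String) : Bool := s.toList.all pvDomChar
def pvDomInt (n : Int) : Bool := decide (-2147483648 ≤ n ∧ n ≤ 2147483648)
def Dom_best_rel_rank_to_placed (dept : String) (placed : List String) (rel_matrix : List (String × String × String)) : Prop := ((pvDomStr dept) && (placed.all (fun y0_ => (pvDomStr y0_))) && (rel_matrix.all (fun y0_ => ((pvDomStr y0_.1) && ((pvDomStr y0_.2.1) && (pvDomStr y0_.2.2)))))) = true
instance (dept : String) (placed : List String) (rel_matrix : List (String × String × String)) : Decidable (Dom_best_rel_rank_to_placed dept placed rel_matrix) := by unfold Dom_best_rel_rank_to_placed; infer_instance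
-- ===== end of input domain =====

-- B replaces A's running-maximum scan over `placed` by a present-letter set plus a scan of the
-- fixed priority table (an alternative decomposition, same cost); equal wherever A returns.

-- dict lookup rel_matrix[(dept, p)]: first entry whose key is (dept, p); none = KeyError
def lookupRel (rel_matrix : List (String × String × String)) (dept p : String) : Option String :=
  (rel_matrix.find? (fun e => e.1 == dept && e.2.1 == p)).map (·.2.2)

-- ===== PORT A =====
-- rank = {'A': 5, 'E': 4, 'I': 3, 'O': 2, 'U': 1, 'X': 0}
def rankDict : PySem.Dict String Int :=
  PySem.Dict.mk [("A", 5), ("E", 4), ("I", 3), ("O", 2), ("U", 1), ("X", 0)]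

-- rank[rel]; the KeyError case (none) is excluded by Pre_, the -2 default is never claimed about
def rankGet (rel : String) : Int := (rankDict.get? rel).getD (-2)

def best_rel_rank_to_placed (dept : String) (placed : List String) (rel_matrix : List (String × String × String)) : Int × Option String :=
  placed.foldl (fun st p =>
    let rel := (lookupRel rel_matrix dept p).getD ""   -- KeyError (none) excluded by Pre_
    if rankGet rel > st.1 then (rankGet rel, some rel) else st) (-1, none)

-- ===== PORT B =====
def bScan (present : PySem.Set String) : List (String × Int) → Int × Option String
  | [] => (-1, none)
  | (letter, rk) :: rest =>
    if PySem.Set.contains present letter then (rk, some letter) else bScan present rest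

def best_rel_rank_to_placed_alt (dept : String) (placed : List String) (rel_matrix : List (String × String × String)) : Int × Option String :=
  let present : PySem.Set String :=
    placed.foldl (fun s p => PySem.Set.add s ((lookupRel rel_matrix dept p).getD "")) PySem.Set.empty
  bScan present [("A", 5), ("E", 4), ("I", 3), ("O", 2), ("U", 1), ("X", 0)]

-- ===== PRECONDITION & SPEC =====
-- Pre_ = exactly the inputs where A returns: every placed p has an entry for (dept, p) in
-- rel_matrix whose letter is in the rank table (otherwise A raises KeyError).
def Pre_best_rel_rank_to_placed (dept : String) (placed : List String) (rel_matrix : List (String × String × String)) : Prop :=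
  ∀ p ∈ placed, (lookupRel rel_matrix dept p).getD "" ∈ (["A", "E", "I", "O", "U", "X"] : List String)
instance (dept : String) (placed : List String) (rel_matrix : List (String × String × String)) : Decidable (Pre_best_rel_rank_to_placed dept placed rel_matrix) := by unfold Pre_best_rel_rank_to_placed; infer_instance

def pvWitness_best_rel_rank_to_placed : String × List String × (List (String × String × String)) :=
  ("d", ["p", "q"], [("d", "p", "E"), ("d", "q", "A")])

def Spec_best_rel_rank_to_placed (dept : String) (placed : List String) (rel_matrix : List (String × String × String)) (out : Int × Option String) : Prop := out = best_rel_rank_to_placed_alt dept placed rel_matrix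
instance (dept : String) (placed : List String) (rel_matrix : List (String × String × String)) (out : Int × Option String) : Decidable (Spec_best_rel_rank_to_placed dept placed rel_matrix out) := by unfold Spec_best_rel_rank_to_placed; infer_instance

-- ===== CLAIM (what is proved, stated in full; the proofs are below) =====
def Claim_equal_best_rel_rank_to_placed : Prop := ∀ (dept : String) (placed : List String) (rel_matrix : List (String × String × String)), Dom_best_rel_rank_to_placed dept placed rel_matrix → Pre_best_rel_rank_to_placed dept placed rel_matrix → Spec_best_rel_rank_to_placed dept placed rel_matrix (best_rel_rank_to_placed dept placed rel_matrix)

-- ===== LEMMAS AND PROOFS =====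

def pvLetters : List String := ["A", "E", "I", "O", "U", "X"]

-- the letter with a given rank (rank is injective on the six letters)
def letterOf (r : Int) : Option String :=
  if r = 5 then some "A" else if r = 4 then some "E" else if r = 3 then some "I"
  else if r = 2 then some "O" else if r = 1 then some "U" else if r = 0 then some "X" else none

-- maximum rank of a list of letters, -1 when empty
def maxRank (rs : List String) : Int := rs.foldr (fun r m => max (rankGet r) m) (-1)

theorem letters_facts : ∀ r ∈ pvLetters, rankGet r ≤ 5 ∧ 0 ≤ rankGet r ∧ letterOf (rankGet r) = some r := by decide

theorem rank_A : rankGet "A" = 5 := by decide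
theorem rank_E : rankGet "E" = 4 := by decide
theorem rank_I : rankGet "I" = 3 := by decide
theorem rank_O : rankGet "O" = 2 := by decide
theorem rank_U : rankGet "U" = 1 := by decide
theorem rank_X : rankGet "X" = 0 := by decide
theorem ub_E : ∀ r ∈ pvLetters, r ≠ "A" → rankGet r ≤ 4 := by decide
theorem ub_I : ∀ r ∈ pvLetters, r ≠ "A" → r ≠ "E" → rankGet r ≤ 3 := by decide
theorem ub_O : ∀ r ∈ pvLetters, r ≠ "A" → r ≠ "E" → r ≠ "I" → rankGet r ≤ 2 := by decide
theorem ub_U : ∀ r ∈ pvLetters, r ≠ "A" → r ≠ "E" → r ≠ "I" → r ≠ "O" → rankGet r ≤ 1 := by decide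
theorem ub_X : ∀ r ∈ pvLetters, r ≠ "A" → r ≠ "E" → r ≠ "I" → r ≠ "O" → r ≠ "U" → rankGet r ≤ 0 := by decide
theorem ub_none : ∀ r ∈ pvLetters, (r ≠ "A" ∧ r ≠ "E" ∧ r ≠ "I" ∧ r ≠ "O" ∧ r ≠ "U" ∧ r ≠ "X") → rankGet r ≤ -1 := by decide

theorem neg_one_le_maxRank (rs : List String) : -1 ≤ maxRank rs := by
  induction rs with
  | nil => simp [maxRank]
  | cons r rs ih => simp only [maxRank, List.foldr] at *; omega

theorem maxRank_le (rs : List String) (k : Int) (hk : -1 ≤ k)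
    (h : ∀ r ∈ rs, rankGet r ≤ k) : maxRank rs ≤ k := by
  induction rs with
  | nil => simpa [maxRank]
  | cons r rs ih =>
    simp only [maxRank, List.foldr] at *
    have h1 := h r (by simp)
    have h2 : List.foldr (fun r m => max (rankGet r) m) (-1) rs ≤ k :=
      ih (fun r hr => h r (by simp [hr]))
    omega

theorem le_maxRank (rs : List String) (r : String) (hr : r ∈ rs) : rankGet r ≤ maxRank rs := by
  induction rs with
  | nil => simp at hr
  | cons x rs ih =>
    simp only [maxRank, List.foldr] at *
    rcases List.mem_cons.mp hr with h | h
    · subst h; omega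
    · have := ih h; omega

-- A's running-maximum loop computes (max br (maxRank (l.map f)), letterOf …) from a coherent state
theorem aLoop_eq (f : String → String) (l : List String) (hl : ∀ p ∈ l, f p ∈ pvLetters) :
    ∀ br : Int, ∀ bl : Option String, -1 ≤ br → bl = letterOf br →
    l.foldl (fun st p => if rankGet (f p) > st.1 then (rankGet (f p), some (f p)) else st) (br, bl)
      = (max br (maxRank (l.map f)), letterOf (max br (maxRank (l.map f)))) := by
  induction l with
  | nil =>
    intro br bl hbr hbl
    have : max br (maxRank (([] : List String).map f)) = br := by simp [maxRank]; omega
    simp only [List.foldl]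
    rw [this, hbl]
  | cons p l ih =>
    intro br bl hbr hbl
    have hfacts := letters_facts (f p) (hl p (by simp))
    have hl' : ∀ x ∈ l, f x ∈ pvLetters := fun x hx => hl x (by simp [hx])
    have hM : maxRank ((p :: l).map f) = max (rankGet (f p)) (maxRank (l.map f)) := by
      simp [maxRank]
    simp only [List.foldl]
    by_cases hgt : rankGet (f p) > br
    · rw [if_pos hgt, ih hl' (rankGet (f p)) (some (f p)) (by omega) hfacts.2.2.symm]
      have : max (rankGet (f p)) (maxRank (l.map f)) = max br (maxRank ((p :: l).map f)) := by
        rw [hM]; omega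
      rw [this]
    · rw [if_neg hgt, ih hl' br bl hbr hbl]
      have : max br (maxRank (l.map f)) = max br (maxRank ((p :: l).map f)) := by
        rw [hM]; omega
      rw [this]

-- B's priority scan returns (maxRank rs, letterOf (maxRank rs)) when membership matches rs
theorem bScan_eq (present : PySem.Set String) (rs : List String)
    (hrs : ∀ r ∈ rs, r ∈ pvLetters)
    (hmem : ∀ L : String, L ∈ present ↔ L ∈ rs) :
    bScan present [("A", 5), ("E", 4), ("I", 3), ("O", 2), ("U", 1), ("X", 0)]
      = (maxRank rs, letterOf (maxRank rs)) := by
  have hub : ∀ r ∈ rs, rankGet r ≤ 5 := fun r hr => (letters_facts r (hrs r hr)).1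
  have hM5 : maxRank rs ≤ 5 := maxRank_le rs 5 (by omega) hub
  by_cases hA : "A" ∈ rs
  · have h5 : maxRank rs = 5 :=
      le_antisymm hM5 (by have := le_maxRank rs "A" hA; rw [rank_A] at this; omega)
    simp [bScan, hmem, hA, h5, letterOf]
  · have hub4 : ∀ r ∈ rs, rankGet r ≤ 4 :=
      fun r hr => ub_E r (hrs r hr) (fun h => hA (h ▸ hr))
    have hM4 : maxRank rs ≤ 4 := maxRank_le rs 4 (by omega) hub4
    by_cases hE : "E" ∈ rs
    · have h4 : maxRank rs = 4 :=
        le_antisymm hM4 (by have := le_maxRank rs "E" hE; rw [rank_E] at this; omega)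
      simp [bScan, hmem, hA, hE, h4, letterOf]
    · have hub3 : ∀ r ∈ rs, rankGet r ≤ 3 :=
        fun r hr => ub_I r (hrs r hr) (fun h => hA (h ▸ hr)) (fun h => hE (h ▸ hr))
      have hM3 : maxRank rs ≤ 3 := maxRank_le rs 3 (by omega) hub3
      by_cases hI : "I" ∈ rs
      · have h3 : maxRank rs = 3 :=
          le_antisymm hM3 (by have := le_maxRank rs "I" hI; rw [rank_I] at this; omega)
        simp [bScan, hmem, hA, hE, hI, h3, letterOf]
      · have hub2 : ∀ r ∈ rs, rankGet r ≤ 2 :=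
          fun r hr => ub_O r (hrs r hr) (fun h => hA (h ▸ hr)) (fun h => hE (h ▸ hr)) (fun h => hI (h ▸ hr))
        have hM2 : maxRank rs ≤ 2 := maxRank_le rs 2 (by omega) hub2
        by_cases hO : "O" ∈ rs
        · have h2 : maxRank rs = 2 :=
            le_antisymm hM2 (by have := le_maxRank rs "O" hO; rw [rank_O] at this; omega)
          simp [bScan, hmem, hA, hE, hI, hO, h2, letterOf]
        · have hub1 : ∀ r ∈ rs, rankGet r ≤ 1 :=
            fun r hr => ub_U r (hrs r hr) (fun h => hA (h ▸ hr)) (fun h => hE (h ▸ hr)) (fun h => hI (h ▸ hr)) (fun h => hO (h ▸ hr))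
          have hM1 : maxRank rs ≤ 1 := maxRank_le rs 1 (by omega) hub1
          by_cases hU : "U" ∈ rs
          · have h1 : maxRank rs = 1 :=
              le_antisymm hM1 (by have := le_maxRank rs "U" hU; rw [rank_U] at this; omega)
            simp [bScan, hmem, hA, hE, hI, hO, hU, h1, letterOf]
          · have hub0 : ∀ r ∈ rs, rankGet r ≤ 0 :=
              fun r hr => ub_X r (hrs r hr) (fun h => hA (h ▸ hr)) (fun h => hE (h ▸ hr)) (fun h => hI (h ▸ hr)) (fun h => hO (h ▸ hr)) (fun h => hU (h ▸ hr))
            have hM0 : maxRank rs ≤ 0 := maxRank_le rs 0 (by omega) hub0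
            by_cases hX : "X" ∈ rs
            · have h0 : maxRank rs = 0 :=
                le_antisymm hM0 (by have := le_maxRank rs "X" hX; rw [rank_X] at this; omega)
              simp [bScan, hmem, hA, hE, hI, hO, hU, hX, h0, letterOf]
            · have hubm : ∀ r ∈ rs, rankGet r ≤ -1 :=
                fun r hr => ub_none r (hrs r hr) ⟨fun h => hA (h ▸ hr), fun h => hE (h ▸ hr), fun h => hI (h ▸ hr), fun h => hO (h ▸ hr), fun h => hU (h ▸ hr), fun h => hX (h ▸ hr)⟩
              have hMm : maxRank rs = -1 :=
                le_antisymm (maxRank_le rs (-1) (by omega) hubm) (neg_one_le_maxRank rs)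
              simp [bScan, hmem, hA, hE, hI, hO, hU, hX, hMm, letterOf]

-- ===== VERDICT (by name: the statement is the Claim_ definition above) =====
theorem best_rel_rank_to_placed_spec : Claim_equal_best_rel_rank_to_placed := by
  intro dept placed rel_matrix _ hpre
  unfold Spec_best_rel_rank_to_placed best_rel_rank_to_placed best_rel_rank_to_placed_alt
  set f : String → String := fun p => (lookupRel rel_matrix dept p).getD "" with hf
  have hl : ∀ p ∈ placed, f p ∈ pvLetters := fun p hp => hpre p hp
  have hrs : ∀ r ∈ placed.map f, r ∈ pvLetters := by
    intro r hr
    rcases List.mem_map.mp hr with ⟨p, hp, rfl⟩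
    exact hl p hp
  have hA := aLoop_eq f placed hl (-1) none (by omega) (by simp [letterOf])
  have hmax : max (-1) (maxRank (placed.map f)) = maxRank (placed.map f) := by
    have := neg_one_le_maxRank (placed.map f); omega
  have hmem : ∀ L : String,
      L ∈ placed.foldl (fun s p => PySem.Set.add s (f p)) PySem.Set.empty ↔ L ∈ placed.map f := by
    intro L
    rw [PySem.Set.mem_foldl_add]
    simp [List.mem_map, PySem.Set.empty, eq_comm]
  simp only []
  rw [hA, hmax, bScan_eq _ (placed.map f) hrs hmem]
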